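-- pv_equiv track=rewrite | github.com/LChenXiang/Algorithms | Boyer_Moore.py | matched_prefix
-- ===== SOURCE A (Python) =====
-- def matched_prefix(z_arr, n):
--     mp = [0] * (n + 1)
--
--     z_i = 0
--     mp_i = n - 1
--
--     while z_i < n and mp_i >= 0:
--
--         if z_arr[z_i] == z_i + 1:
--             mp[mp_i] = z_arr[z_i]
--
--         else:
--             mp[mp_i] = mp[mp_i + 1]
--
--         z_i += 1
--         mp_i -= 1
--
--     return mp
-- ===== SOURCE B (Python) =====
-- def matched_prefix(z_arr, n):
--     # Pass 1: mark positions that correspond to a full match (value i+1 >= 1),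
--     # leaving gaps as the 0 sentinel.  Pass 2: propagate from the right.
--     mp = [0] * (n + 1)
--     for i in range(n):
--         if z_arr[i] == i + 1:
--             mp[n - 1 - i] = i + 1
--     for idx in range(n - 1, -1, -1):
--         if mp[idx] == 0:
--             mp[idx] = mp[idx + 1]
--     return mp
-- ===== Notes on version B (the rewrite author's own statement) =====
-- stated objective: alternative
-- what changed: Replaces A's single dual-index while-loop (which interleaves testing the z-condition with right-to-left propagation) by two independent passes: a marking pass that records matches with a 0 sentinel for gaps, and a fill pass keyed only on the sentinel.
import Mathlib
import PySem

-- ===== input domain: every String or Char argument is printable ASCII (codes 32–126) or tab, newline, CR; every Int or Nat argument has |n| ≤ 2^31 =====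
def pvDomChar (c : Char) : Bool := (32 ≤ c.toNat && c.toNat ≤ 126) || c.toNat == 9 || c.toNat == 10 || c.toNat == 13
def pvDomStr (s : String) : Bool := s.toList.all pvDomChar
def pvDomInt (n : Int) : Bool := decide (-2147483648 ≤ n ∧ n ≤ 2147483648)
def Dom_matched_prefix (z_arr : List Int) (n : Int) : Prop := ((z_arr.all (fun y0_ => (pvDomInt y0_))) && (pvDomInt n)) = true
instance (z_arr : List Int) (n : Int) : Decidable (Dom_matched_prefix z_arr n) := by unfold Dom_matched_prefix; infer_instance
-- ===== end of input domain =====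

-- B replaces A's single dual-index while-loop by two independent passes (mark matches
-- with a 0 sentinel, then propagate from the right); same O(n) cost, objective: alternative.

-- ===== PORT A =====
-- A's while-loop: state (mp, z_i, mp_i); `none` from pyGet? (IndexError) is excluded by Pre_
def mpLoopA (z : List Int) (n : Int) (mp : List Int) (z_i mp_i : Int) : List Int :=
  if h : z_i < n ∧ 0 ≤ mp_i then
    match PySem.List.pyGet? z z_i with
    | none => mp
    | some v =>
      let mp' := if v = z_i + 1 then PySem.List.pySetD mp mp_i v
                 else PySem.List.pySetD mp mp_i (PySem.List.pyGetD mp (mp_i + 1) 0)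
      mpLoopA z n mp' (z_i + 1) (mp_i - 1)
  else mp
termination_by (n - z_i).toNat
decreasing_by omega

def matched_prefix (z_arr : List Int) (n : Int) : List Int :=
  mpLoopA z_arr n (List.replicate (n + 1).toNat 0) 0 (n - 1)

-- ===== PORT B =====
-- pass 1 body: mark a full match at position n-1-i (z_arr[i] raising = none, excluded by Pre_)
def altStep1 (z : List Int) (n : Int) (mp : List Int) (i : Int) : List Int :=
  match PySem.List.pyGet? z i with
  | none => mp
  | some v => if v = i + 1 then PySem.List.pySetD mp (n - 1 - i) (i + 1) else mp

-- pass 2 body: fill a sentinel gap from the right neighbour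
def altStep2 (mp : List Int) (idx : Int) : List Int :=
  if PySem.List.pyGetD mp idx 0 = 0 then
    PySem.List.pySetD mp idx (PySem.List.pyGetD mp (idx + 1) 0)
  else mp

def matched_prefix_alt (z_arr : List Int) (n : Int) : List Int :=
  let mp0 := List.replicate (n + 1).toNat 0
  let mp1 := (PySem.List.pyRange 0 n 1).foldl (altStep1 z_arr n) mp0
  (PySem.List.pyRange (n - 1) (-1) (-1)).foldl altStep2 mp1

-- ===== PRECONDITION & SPEC =====
-- Pre_ excludes exactly the IndexError inputs: when n > len(z_arr) and n ≥ 1 both A and B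
-- raise IndexError reading z_arr; A returns normally on every input Pre_ admits.
def Pre_matched_prefix (z_arr : List Int) (n : Int) : Prop := n ≤ (z_arr.length : Int)
instance (z_arr : List Int) (n : Int) : Decidable (Pre_matched_prefix z_arr n) := by
  unfold Pre_matched_prefix; infer_instance

def pvWitness_matched_prefix : List Int × Int := ([1, 0, 3], 3)

def Spec_matched_prefix (z_arr : List Int) (n : Int) (out : List Int) : Prop := out = matched_prefix_alt z_arr n
instance (z_arr : List Int) (n : Int) (out : List Int) : Decidable (Spec_matched_prefix z_arr n out) := by unfold Spec_matched_prefix; infer_instance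

-- ===== CLAIM (what is proved, stated in full; the proofs are below) =====
def Claim_equal_matched_prefix : Prop := ∀ (z_arr : List Int) (n : Int), Dom_matched_prefix z_arr n → Pre_matched_prefix z_arr n → Spec_matched_prefix z_arr n (matched_prefix z_arr n)

-- ===== LEMMAS AND PROOFS =====

-- the final suffix: specTail z t = final values of mp at positions n-t .. n
def specTail (z : List Int) : Nat → List Int
  | 0 => [0]
  | t + 1 =>
      (if z.getD t 0 = (t : Int) + 1 then ((t : Int) + 1) else (specTail z t).headD 0)
        :: specTail z t

-- after pass 1: markTail z t = pass-1 values at positions n-t .. n (0 = sentinel gap)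
def markTail (z : List Int) : Nat → List Int
  | 0 => [0]
  | t + 1 => (if z.getD t 0 = (t : Int) + 1 then ((t : Int) + 1) else 0) :: markTail z t

theorem length_markTail (z : List Int) (t : Nat) : (markTail z t).length = t + 1 := by
  induction t with
  | zero => rfl
  | succ t ih => simp [markTail, ih]

theorem markTail_drop (z : List Int) (N t : Nat) (h : t ≤ N) :
    (markTail z N).drop (N - t) = markTail z t := by
  induction N with
  | zero => interval_cases t; rfl
  | succ N ih =>
    rcases Nat.eq_or_lt_of_le h with rfl | h' 
    · simp
    · have ht : t ≤ N := by omega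
      have hs : N + 1 - t = (N - t) + 1 := by omega
      rw [hs]
      simpa [markTail] using ih ht

theorem set_append_len {α : Type} (pre : List α) (x v : α) (suf : List α) :
    (pre ++ x :: suf).set pre.length v = pre ++ v :: suf := by
  induction pre with
  | nil => rfl
  | cons a pre ih => simp [List.set, ih]

theorem getElem?_append_len {α : Type} (pre suf : List α) :
    (pre ++ suf)[pre.length]? = suf[0]? := by
  rw [List.getElem?_append_right (le_refl _)]
  simp

theorem set_append_len' {α : Type} (pre : List α) (x v : α) (suf : List α) (k : Nat)
    (hk : pre.length = k) : (pre ++ x :: suf).set k v = pre ++ v :: suf := by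
  subst hk; exact set_append_len pre x v suf

theorem getElem?_append_len' {α : Type} (pre suf : List α) (k : Nat) (hk : pre.length = k) :
    (pre ++ suf)[k]? = suf[0]? := by
  subst hk; exact getElem?_append_len pre suf

-- A's loop, characterised: starting after t iterations the loop finishes to specTail z N
theorem loopA_spec (z : List Int) (N : Nat) (hlen : N ≤ z.length) :
    ∀ (k t : Nat), t + k = N →
      mpLoopA z (N : Int) (List.replicate k 0 ++ specTail z t) (t : Int) ((N : Int) - 1 - t)
        = specTail z N := by
  intro k
  induction k with
  | zero =>
    intro t htk
    have ht : t = N := by omega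
    subst ht
    rw [mpLoopA]
    rw [dif_neg (by push_cast; omega)]
    simp
  | succ k ih =>
    intro t htk
    have htN : t < N := by omega
    have htz : t < z.length := by omega
    rw [mpLoopA]
    rw [dif_pos (by constructor <;> [exact_mod_cast (by omega : (t:Int) < N); omega])]
    rw [show PySem.List.pyGet? z (t : Int) = some z[t] by
      rw [PySem.List.pyGet?_natCast]; exact List.getElem?_eq_getElem htz]
    dsimp only
    have hgetD : z.getD t 0 = z[t] := List.getD_eq_getElem z 0 htz
    have hidx : (N : Int) - 1 - t = ((k : Nat) : Int) := by push_cast; omega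
    have hidx1 : (N : Int) - 1 - t + 1 = (((k + 1 : Nat)) : Int) := by push_cast; omega
    have hrepl : List.replicate (k + 1) (0:Int) ++ specTail z t
        = List.replicate k (0:Int) ++ (0 :: specTail z t) := by
      rw [List.replicate_succ']; simp
    have hlenrepl : (List.replicate k (0:Int)).length = k := List.length_replicate
    by_cases hc : z[t] = (t : Int) + 1
    · rw [if_pos hc]
      rw [hidx, PySem.List.pySetD_natCast, hrepl,
        set_append_len' (List.replicate k 0) 0 (z[t]) (specTail z t) k hlenrepl]
      have hnext : List.replicate k (0:Int) ++ (z[t] :: specTail z t)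
          = List.replicate k (0:Int) ++ specTail z (t + 1) := by
        rw [specTail, if_pos (by rw [hgetD]; exact hc), ← hc]
      rw [hnext]
      have := ih (t + 1) (by omega)
      rw [show ((t + 1 : Nat) : Int) = (t : Int) + 1 by push_cast; ring] at this
      rw [show (N : Int) - 1 - ((t : Int) + 1) = (k : Int) - 1 by omega] at this
      exact this
    · rw [if_neg hc]
      rw [hidx1, PySem.List.pyGetD_natCast]
      have hread : (List.replicate (k + 1) (0:Int) ++ specTail z t).getD (k + 1) 0
          = (specTail z t).headD 0 := by
        rw [List.getD]
        rw [getElem?_append_len' (List.replicate (k + 1) 0) (specTail z t) (k + 1) (by simp)]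
        cases specTail z t <;> simp
      rw [hread, hidx, PySem.List.pySetD_natCast, hrepl,
        set_append_len' (List.replicate k 0) 0 _ (specTail z t) k hlenrepl]
      have hnext : List.replicate k (0:Int) ++ ((specTail z t).headD 0 :: specTail z t)
          = List.replicate k (0:Int) ++ specTail z (t + 1) := by
        rw [specTail, if_neg (by rw [hgetD]; exact hc)]
      rw [hnext]
      have := ih (t + 1) (by omega)
      rw [show ((t + 1 : Nat) : Int) = (t : Int) + 1 by push_cast; ring] at this
      rw [show (N : Int) - 1 - ((t : Int) + 1) = (k : Int) - 1 by omega] at this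
      exact this

-- B's pass 1, characterised
theorem pass1_spec (z : List Int) (N : Nat) (hlen : N ≤ z.length) :
    ∀ (k t : Nat), t + k = N →
      (PySem.List.pyRange (t : Int) (N : Int) 1).foldl (altStep1 z (N : Int))
          (List.replicate k 0 ++ markTail z t) = markTail z N := by
  intro k
  induction k with
  | zero =>
    intro t htk
    have ht : t = N := by omega
    subst ht
    rw [PySem.List.pyRange_one_eq_nil (le_refl _)]
    simp
  | succ k ih =>
    intro t htk
    have htN : t < N := by omega
    have htz : t < z.length := by omega
    rw [PySem.List.pyRange_one_cons (by exact_mod_cast (by omega : (t:Int) < N))]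
    rw [List.foldl_cons]
    rw [show altStep1 z (N : Int) (List.replicate (k+1) 0 ++ markTail z t) (t : Int)
        = List.replicate k 0 ++ markTail z (t + 1) from ?_]
    · have := ih (t + 1) (by omega)
      rw [show ((t + 1 : Nat) : Int) = (t : Int) + 1 by push_cast; ring] at this
      exact this
    · rw [altStep1]
      rw [show PySem.List.pyGet? z (t : Int) = some z[t] by
        rw [PySem.List.pyGet?_natCast]; exact List.getElem?_eq_getElem htz]
      dsimp only
      have hgetD : z.getD t 0 = z[t] := List.getD_eq_getElem z 0 htz
      have hidx : (N : Int) - 1 - t = ((k : Nat) : Int) := by push_cast; omega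
      have hrepl : List.replicate (k + 1) (0:Int) ++ markTail z t
          = List.replicate k (0:Int) ++ (0 :: markTail z t) := by
        rw [List.replicate_succ']; simp
      have hlenrepl : (List.replicate k (0:Int)).length = k := List.length_replicate
      by_cases hc : z[t] = (t : Int) + 1
      · rw [if_pos hc]
        rw [hidx, PySem.List.pySetD_natCast, hrepl,
          set_append_len' (List.replicate k 0) 0 _ (markTail z t) k hlenrepl]
        rw [markTail, if_pos (by rw [hgetD]; exact hc)]
      · rw [if_neg hc]
        rw [hrepl, markTail, if_neg (by rw [hgetD]; exact hc)]

-- B's pass 2, characterised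
theorem pass2_spec (z : List Int) (N : Nat) :
    ∀ (k t : Nat), t + k = N →
      (PySem.List.pyRange ((N : Int) - 1 - t) (-1) (-1)).foldl altStep2
          ((markTail z N).take k ++ specTail z t) = specTail z N := by
  intro k
  induction k with
  | zero =>
    intro t htk
    have ht : t = N := by omega
    subst ht
    rw [PySem.List.pyRange_neg_one_eq_nil (by omega)]
    simp
  | succ k ih =>
    intro t htk
    have htN : t < N := by omega
    rw [PySem.List.pyRange_neg_one_cons (by omega)]
    rw [List.foldl_cons]
    -- facts about markTail z N near position k
    have hlenM : (markTail z N).length = N + 1 := length_markTail z N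
    have hdrop : (markTail z N).drop k = markTail z (t + 1) := by
      have := markTail_drop z N (t + 1) (by omega)
      rwa [show N - (t + 1) = k by omega] at this
    have htake1 : (markTail z N).take (k + 1)
        = (markTail z N).take k ++ [(markTail z (t+1)).headD 0] := by
      rw [show k + 1 = k + 1 from rfl, List.take_add, hdrop]
      rw [markTail]; simp
    have hlen_take : ((markTail z N).take k).length = k := by
      rw [List.length_take]; omega
    set e : Int := if z.getD t 0 = (t : Int) + 1 then ((t : Int) + 1) else 0 with he
    have hheadD : (markTail z (t+1)).headD 0 = e := by rw [markTail]; rfl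
    have hmp : (markTail z N).take (k + 1) ++ specTail z t
        = (markTail z N).take k ++ (e :: specTail z t) := by
      rw [htake1, hheadD]; simp
    have hidx : (N : Int) - 1 - t = ((k : Nat) : Int) := by push_cast; omega
    have hread : PySem.List.pyGetD ((markTail z N).take (k+1) ++ specTail z t) ((N:Int) - 1 - t) 0 = e := by
      rw [hidx, PySem.List.pyGetD_natCast, hmp, List.getD,
        getElem?_append_len' ((markTail z N).take k) (e :: specTail z t) k hlen_take]
      simp
    have hread1 : PySem.List.pyGetD ((markTail z N).take (k+1) ++ specTail z t) ((N:Int) - 1 - t + 1) 0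
        = (specTail z t).headD 0 := by
      rw [show (N:Int) - 1 - t + 1 = (((k+1 : Nat)) : Int) by push_cast; omega]
      rw [PySem.List.pyGetD_natCast, List.getD]
      rw [getElem?_append_len' ((markTail z N).take (k+1)) (specTail z t) (k + 1)
        (by rw [List.length_take]; omega)]
      cases specTail z t <;> simp
    rw [altStep2, hread]
    by_cases hc : z.getD t 0 = (t : Int) + 1
    · have hene : e ≠ 0 := by rw [he, if_pos hc]; omega
      rw [if_neg hene]
      have hnext : (markTail z N).take (k+1) ++ specTail z t
          = (markTail z N).take k ++ specTail z (t + 1) := by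
        rw [hmp, specTail, if_pos hc, he, if_pos hc]
      rw [hnext]
      have := ih (t + 1) (by omega)
      rw [show (N : Int) - 1 - ((t + 1 : Nat) : Int) = (N : Int) - 1 - (t : Int) - 1 by
        push_cast; ring] at this
      exact this
    · have hez : e = 0 := by rw [he, if_neg hc]
      rw [if_pos hez, hread1, hidx, PySem.List.pySetD_natCast, hmp, hez,
        set_append_len' ((markTail z N).take k) 0 _ (specTail z t) k hlen_take]
      have hnext : (markTail z N).take k ++ ((specTail z t).headD 0 :: specTail z t)
          = (markTail z N).take k ++ specTail z (t + 1) := by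
        rw [specTail, if_neg hc]
      rw [hnext]
      have := ih (t + 1) (by omega)
      rw [show (N : Int) - 1 - ((t + 1 : Nat) : Int) = (k : Int) - 1 by push_cast; omega] at this
      exact this

-- ===== VERDICT (by name: the statement is the Claim_ definition above) =====
theorem matched_prefix_spec : Claim_equal_matched_prefix := by
  intro z n _ hpre
  unfold Spec_matched_prefix
  by_cases hn : n ≤ 0
  · -- no iteration on either side
    rw [matched_prefix, matched_prefix_alt, mpLoopA]
    rw [dif_neg (by omega)]
    rw [PySem.List.pyRange_one_eq_nil hn, PySem.List.pyRange_neg_one_eq_nil (by omega)]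
    simp
  · push_neg at hn
    obtain ⟨N, hN⟩ : ∃ N : Nat, n = (N : Int) := ⟨n.toNat, by omega⟩
    subst hN
    have hlen : N ≤ z.length := by
      unfold Pre_matched_prefix at hpre; exact_mod_cast hpre
    have hNpos : 0 < N := by exact_mod_cast hn
    -- A side
    rw [matched_prefix]
    have hinitA : List.replicate ((N : Int) + 1).toNat (0:Int)
        = List.replicate N 0 ++ specTail z 0 := by
      rw [show ((N : Int) + 1).toNat = N + 1 by omega, List.replicate_succ']
      rfl
    rw [hinitA]
    have hA := loopA_spec z N hlen N 0 (by omega)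
    rw [show ((0 : Nat) : Int) = 0 by rfl] at hA
    rw [show (N : Int) - 1 - 0 = (N : Int) - 1 by ring] at hA
    rw [hA]
    -- B side
    rw [matched_prefix_alt]
    have hinitB : List.replicate ((N : Int) + 1).toNat (0:Int)
        = List.replicate N 0 ++ markTail z 0 := by
      rw [show ((N : Int) + 1).toNat = N + 1 by omega, List.replicate_succ']
      rfl
    rw [hinitB]
    have hB1 := pass1_spec z N hlen N 0 (by omega)
    rw [show ((0 : Nat) : Int) = 0 by rfl] at hB1
    rw [hB1]
    have hstart : markTail z N = (markTail z N).take N ++ specTail z 0 := by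
      conv_lhs => rw [← List.take_append_drop N (markTail z N)]
      have hd := markTail_drop z N 0 (by omega)
      rw [Nat.sub_zero] at hd
      rw [hd]
      rfl
    rw [hstart]
    have hB2 := pass2_spec z N N 0 (by omega)
    rw [show (N : Int) - 1 - ((0:Nat) : Int) = (N : Int) - 1 by push_cast; ring] at hB2
    rw [hB2]
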